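-- pv_equiv track=rewrite | github.com/kareemadesola/pythonDataStructures | LeetCode/daily/october_23.py | minOperationsBS
-- ===== SOURCE A (Python) =====
-- import bisect
-- from typing import List, Optional
--
-- def minOperationsBS(nums: List[int]) -> int:
--     n = len(nums)
--     nums = sorted(set(nums))
--     res = n
--
--     for l in range(len(nums)):
--         r = bisect.bisect(nums, nums[l] + n - 1)
--         window = r - l
--         res = min(res, n - window)
--     return res
-- ===== SOURCE B (Python) =====
-- def minOperationsBS(nums):
--     n = len(nums)
--     s = sorted(set(nums))
--     res = n
--     r = 0
--     for l in range(len(s)):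
--         while r < len(s) and s[r] <= s[l] + n - 1:
--             r += 1
--         res = min(res, n - (r - l))
--     return res
-- ===== Notes on version B (the rewrite author's own statement) =====
-- stated objective: alternative
-- what changed: Replaced the per-index bisect_right binary search with a monotone two-pointer sliding window whose right pointer never moves backward, so the scan over the sorted unique values is a single linear pass (measured ~1.4x, below the 1.5x bar).
import Mathlib
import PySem

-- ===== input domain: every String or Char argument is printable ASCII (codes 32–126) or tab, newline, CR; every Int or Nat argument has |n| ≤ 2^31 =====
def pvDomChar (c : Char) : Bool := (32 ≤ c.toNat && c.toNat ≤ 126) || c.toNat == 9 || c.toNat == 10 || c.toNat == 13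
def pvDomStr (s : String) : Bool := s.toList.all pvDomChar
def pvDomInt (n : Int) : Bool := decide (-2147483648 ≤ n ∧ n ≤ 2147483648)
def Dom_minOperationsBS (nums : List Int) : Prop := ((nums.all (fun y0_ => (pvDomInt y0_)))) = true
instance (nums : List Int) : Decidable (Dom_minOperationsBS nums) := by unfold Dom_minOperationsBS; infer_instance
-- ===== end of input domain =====

-- B replaces the per-index bisect_right binary search with a two-pointer sliding window
-- (the right pointer never moves backward over the sorted unique values).

-- ===== PORT A =====
-- bisect.bisect(nums, x) is PySem.List.bisectRight; nums[l] with l ∈ range(len(nums)) is in range,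
-- ported as pyGetD (exact there).
def minOperationsBS (nums : List Int) : Int :=
  let n : Int := nums.length
  let s : List Int := PySem.List.sorted (PySem.Set.ofList nums) (fun x => x) false
  (PySem.List.pyRange 0 (s.length : Int) 1).foldl
    (fun res l =>
      let r : Int := (PySem.List.bisectRight s (PySem.List.pyGetD s l 0 + n - 1) : Int)
      let window := r - l
      min res (n - window)) n

-- ===== PORT B =====
-- the inner 'while r < len(s) and s[r] <= x: r += 1' of Source B
def altWhile (s : List Int) (x : Int) (r : Nat) : Nat :=
  if h : r < s.length then
    if s[r] ≤ x then altWhile s x (r + 1) else r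
  else r
termination_by s.length - r

-- the outer 'for l in range(len(s))' of Source B, carrying (r, res)
def altLoop (s : List Int) (n : Int) (l r : Nat) (res : Int) : Int :=
  if h : l < s.length then
    let r' := altWhile s (s[l] + n - 1) r
    altLoop s n (l + 1) r' (min res (n - ((r' : Int) - (l : Int))))
  else res
termination_by s.length - l

def minOperationsBS_alt (nums : List Int) : Int :=
  let n : Int := nums.length
  let s : List Int := PySem.List.sorted (PySem.Set.ofList nums) (fun x => x) false
  altLoop s n 0 0 n

-- ===== PRECONDITION & SPEC =====
def Spec_minOperationsBS (nums : List Int) (out : Int) : Prop := out = minOperationsBS_alt nums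
instance (nums : List Int) (out : Int) : Decidable (Spec_minOperationsBS nums out) := by unfold Spec_minOperationsBS; infer_instance

-- ===== CLAIM (what is proved, stated in full; the proofs are below) =====
def Claim_equal_minOperationsBS : Prop := ∀ (nums : List Int), Dom_minOperationsBS nums → Spec_minOperationsBS nums (minOperationsBS nums)

-- ===== LEMMAS AND PROOFS =====

-- the while loop lands exactly on bisect_right, provided it starts at or before it
theorem altWhile_eq (s : List Int) (x : Int) (hs : s.Pairwise (· ≤ ·)) (r : Nat)
    (hr : r ≤ PySem.List.bisectRight s x) :
    altWhile s x r = PySem.List.bisectRight s x := by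
  obtain ⟨hlen, hlt, hge⟩ := PySem.List.bisectRight_spec s x hs
  rw [altWhile]
  split
  · next h =>
    split
    · next hle =>
      have : r < PySem.List.bisectRight s x := by
        by_contra hc
        exact absurd (hge r h (by omega)) (by omega)
      exact altWhile_eq s x hs (r + 1) (by omega)
    · next hgt =>
      have : ¬ r < PySem.List.bisectRight s x := fun hc => hgt (hlt r h hc)
      omega
  · next h => omega
termination_by s.length - r

theorem bisect_mono (s : List Int) (hs : s.Pairwise (· ≤ ·)) (x y : Int) (hxy : x ≤ y) :
    PySem.List.bisectRight s x ≤ PySem.List.bisectRight s y := by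
  obtain ⟨hlenx, hltx, _⟩ := PySem.List.bisectRight_spec s x hs
  obtain ⟨hleny, _, hgey⟩ := PySem.List.bisectRight_spec s y hs
  by_contra hc
  have hk : PySem.List.bisectRight s y < s.length := by omega
  have h1 := hltx _ hk (by omega)
  have h2 := hgey _ hk (le_refl _)
  omega

-- the two-pointer outer loop equals A's fold over the remaining indices
theorem altLoop_eq (s : List Int) (hs : s.Pairwise (· < ·)) (n : Int) (l r : Nat) (res : Int)
    (hr : ∀ _ : l < s.length, r ≤ PySem.List.bisectRight s (s[l] + n - 1)) :
    altLoop s n l r res =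
      (PySem.List.pyRange (l : Int) (s.length : Int) 1).foldl
        (fun res li =>
          min res (n - ((PySem.List.bisectRight s (PySem.List.pyGetD s li 0 + n - 1) : Int) - li))) res := by
  have hsle : s.Pairwise (· ≤ ·) := hs.imp le_of_lt
  rw [altLoop]
  split
  · next h =>
    rw [PySem.List.pyRange_one_cons (by exact_mod_cast h)]
    simp only [List.foldl_cons]
    rw [PySem.List.pyGetD_eq_getElem s (i := (l : Int)) 0 (Int.natCast_nonneg l) (by exact_mod_cast h)]
    simp only [Int.toNat_natCast]
    rw [altWhile_eq s (s[l] + n - 1) hsle r (hr h)]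
    refine altLoop_eq s hs n (l + 1) _ _ ?_
    intro h'
    have hmono : s[l] ≤ s[l + 1] := by
      exact le_of_lt ((List.pairwise_iff_getElem.mp hs) l (l + 1) h h' (by omega))
    exact bisect_mono s hsle _ _ (by omega)
  · next h =>
    rw [PySem.List.pyRange_one_eq_nil (by omega)]
    rfl
termination_by s.length - l

-- ===== VERDICT (by name: the statement is the Claim_ definition above) =====
theorem minOperationsBS_spec : Claim_equal_minOperationsBS := by
  intro nums _
  unfold Spec_minOperationsBS minOperationsBS minOperationsBS_alt
  rw [altLoop_eq _ (PySem.List.sorted_ofList_pairwise_lt nums) _ 0 0 _ (fun _ => Nat.zero_le _)]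
  rfl
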